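-- pv_equiv track=rewrite | github.com/Julesc013/dominium | src/tools/tool_surface_adapter.py | _render_tool_reference
-- ===== SOURCE A (Python) =====
-- from typing import Iterable, Mapping, Sequence
--
-- AREA_ORDER = (
--     "geo",
--     "worldgen",
--     "earth",
--     "sol",
--     "gal",
--     "logic",
--     "sys",
--     "proc",
--     "pack",
--     "lib",
--     "compat",
--     "diag",
--     "server",
--     "client",
-- )
--
-- AREA_DESCRIPTIONS = {
--     "geo": "Deterministic GEO replay, identity, overlay, and metric tooling.",
--     "worldgen": "World generation replay, verification, and stress helpers.",
--     "earth": "Earth-focused replay, stress, and verification tools.",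
--     "sol": "Illumination and orbital proxy replay tooling.",
--     "gal": "Galaxy proxy and compact-object replay tooling.",
--     "logic": "Logic replay, compile, and stress tooling.",
--     "sys": "System composition replay, explain, and stress tooling.",
--     "proc": "Process, capsule, and drift replay tooling.",
--     "pack": "Pack inventory, verification, and capability inspection commands.",
--     "lib": "Library bundle and save verification tooling.",
--     "compat": "Capability negotiation descriptors, replay, and interop tooling.",
--     "diag": "Repro bundle capture, snapshot, and replay tooling.",
--     "server": "Server replay and inspection tooling.",
--     "client": "Client-facing AppShell inspection commands.",
-- }
--
-- def _token(value: object) -> str: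
--     return str(value or "").strip()
--
-- def _render_tool_reference(report: Mapping[str, object]) -> str:
--     lines = [
--         "Status: DERIVED",
--         "Last Reviewed: 2026-03-13",
--         "Supersedes: none",
--         "Superseded By: none",
--         "Stability: provisional",
--         "Future Series: DOC-ARCHIVE",
--         "Replacement Target: release tool reference regenerated from TOOL-SURFACE-0 tooling",
--         "",
--         "# Tool Reference",
--         "",
--         "Use the stable umbrella form:",
--         "",
--         "```text",
--         "dom <area> <command> ...",
--         "```",
--         "",
--     ]
--     for area_id in AREA_ORDER:
--         lines.extend(["## `{}`".format(area_id), "", "{}".format(AREA_DESCRIPTIONS.get(area_id, "")), ""])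
--         matched = [dict(row) for row in list(report.get("rows") or []) if _token(dict(row).get("area_id")) == area_id]
--         for row in matched:
--             lines.append("- `{}`: {}".format(_token(row.get("command_path")), _token(row.get("description"))))
--         if not matched:
--             lines.append("- `dom {}`: namespace reserved; no wrapped commands are currently registered".format(area_id))
--         lines.append("")
--     return "\n".join(lines).rstrip() + "\n"
-- ===== SOURCE B (Python) =====
-- from typing import Mapping
--
-- AREA_ORDER = (
--     "geo", "worldgen", "earth", "sol", "gal", "logic", "sys",
--     "proc", "pack", "lib", "compat", "diag", "server", "client",
-- )
--
-- AREA_DESCRIPTIONS = {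
--     "geo": "Deterministic GEO replay, identity, overlay, and metric tooling.",
--     "worldgen": "World generation replay, verification, and stress helpers.",
--     "earth": "Earth-focused replay, stress, and verification tools.",
--     "sol": "Illumination and orbital proxy replay tooling.",
--     "gal": "Galaxy proxy and compact-object replay tooling.",
--     "logic": "Logic replay, compile, and stress tooling.",
--     "sys": "System composition replay, explain, and stress tooling.",
--     "proc": "Process, capsule, and drift replay tooling.",
--     "pack": "Pack inventory, verification, and capability inspection commands.",
--     "lib": "Library bundle and save verification tooling.",
--     "compat": "Capability negotiation descriptors, replay, and interop tooling.",
--     "diag": "Repro bundle capture, snapshot, and replay tooling.",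
--     "server": "Server replay and inspection tooling.",
--     "client": "Client-facing AppShell inspection commands.",
-- }
--
-- HEADER = (
--     "Status: DERIVED",
--     "Last Reviewed: 2026-03-13",
--     "Supersedes: none",
--     "Superseded By: none",
--     "Stability: provisional",
--     "Future Series: DOC-ARCHIVE",
--     "Replacement Target: release tool reference regenerated from TOOL-SURFACE-0 tooling",
--     "",
--     "# Tool Reference",
--     "",
--     "Use the stable umbrella form:",
--     "",
--     "```text",
--     "dom <area> <command> ...",
--     "```",
--     "",
-- )
--
-- def _token(value: object) -> str:
--     return str(value or "").strip()
--
-- def _bullets(report: Mapping[str, object]) -> dict: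
--     """One pass over the rows: map each area token to its already-rendered bullet lines."""
--     bullets = {}
--     for raw in list(report.get("rows") or []):
--         row = dict(raw)
--         line = "- `{}`: {}".format(_token(row.get("command_path")), _token(row.get("description")))
--         bullets.setdefault(_token(row.get("area_id")), []).append(line)
--     return bullets
--
-- def _section(area_id: str, body: list) -> list:
--     if not body:
--         body = ["- `dom {}`: namespace reserved; no wrapped commands are currently registered".format(area_id)]
--     return ["## `{}`".format(area_id), "", AREA_DESCRIPTIONS.get(area_id, ""), ""] + body + [""]
--
-- def _render_tool_reference(report: Mapping[str, object]) -> str: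
--     bullets = _bullets(report)
--     lines = list(HEADER) + [ln for a in AREA_ORDER for ln in _section(a, bullets.get(a, []))]
--     return "\n".join(lines).rstrip() + "\n"
-- ===== Notes on version B (the rewrite author's own statement) =====
-- stated objective: alternative
-- what changed: B makes one pass over the rows rendering each row to its bullet line while grouping by area token, then assembles the document as a header plus a flat list-comprehension of per-area section blocks built by a helper, instead of A's single accumulator loop that re-scans and re-dicts the whole row list for every one of the 14 areas.
import Mathlib
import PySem

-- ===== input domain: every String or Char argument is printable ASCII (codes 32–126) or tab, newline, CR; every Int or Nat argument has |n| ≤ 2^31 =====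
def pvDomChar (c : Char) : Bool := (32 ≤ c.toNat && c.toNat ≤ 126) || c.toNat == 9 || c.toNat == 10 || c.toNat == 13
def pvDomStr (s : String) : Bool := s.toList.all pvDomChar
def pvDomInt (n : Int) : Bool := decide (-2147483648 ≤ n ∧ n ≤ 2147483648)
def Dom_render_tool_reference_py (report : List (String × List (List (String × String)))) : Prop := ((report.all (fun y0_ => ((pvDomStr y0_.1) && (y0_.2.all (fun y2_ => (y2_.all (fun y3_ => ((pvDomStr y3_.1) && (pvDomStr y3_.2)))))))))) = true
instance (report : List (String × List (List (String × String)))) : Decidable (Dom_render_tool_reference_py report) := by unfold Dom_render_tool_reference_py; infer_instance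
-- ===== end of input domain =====

-- B renders each row to its bullet line during ONE grouping pass over the rows and then assembles the
-- document as header ++ flatMap of per-area section blocks, instead of A's per-area re-scan of the row list.


-- shared module constants / helpers (same-module context, used by both ports)
def pvAreaOrder : List String :=
  ["geo", "worldgen", "earth", "sol", "gal", "logic", "sys",
   "proc", "pack", "lib", "compat", "diag", "server", "client"]

def pvAreaDescriptions : PySem.Dict String String := PySem.Dict.mk
  [("geo", "Deterministic GEO replay, identity, overlay, and metric tooling."),
   ("worldgen", "World generation replay, verification, and stress helpers."),
   ("earth", "Earth-focused replay, stress, and verification tools."),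
   ("sol", "Illumination and orbital proxy replay tooling."),
   ("gal", "Galaxy proxy and compact-object replay tooling."),
   ("logic", "Logic replay, compile, and stress tooling."),
   ("sys", "System composition replay, explain, and stress tooling."),
   ("proc", "Process, capsule, and drift replay tooling."),
   ("pack", "Pack inventory, verification, and capability inspection commands."),
   ("lib", "Library bundle and save verification tooling."),
   ("compat", "Capability negotiation descriptors, replay, and interop tooling."),
   ("diag", "Repro bundle capture, snapshot, and replay tooling."),
   ("server", "Server replay and inspection tooling."),
   ("client", "Client-facing AppShell inspection commands.")]

-- _token(value) for an Optional[str] value: str(value or "").strip()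
def pvToken (o : Option String) : String := PySem.Str.strip (o.getD "")

def pvHeader : List String :=
  ["Status: DERIVED",
   "Last Reviewed: 2026-03-13",
   "Supersedes: none",
   "Superseded By: none",
   "Stability: provisional",
   "Future Series: DOC-ARCHIVE",
   "Replacement Target: release tool reference regenerated from TOOL-SURFACE-0 tooling",
   "",
   "# Tool Reference",
   "",
   "Use the stable umbrella form:",
   "",
   "```text",
   "dom <area> <command> ...",
   "```",
   ""]

-- ===== PORT A =====
def render_tool_reference_py (report : List (String × List (List (String × String)))) : String :=
  let lines := pvAreaOrder.foldl (fun lines area_id =>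
    let lines := lines ++ ["## `" ++ area_id ++ "`", "", pvAreaDescriptions.getD area_id "", ""]
    -- matched = [dict(row) for row in list(report.get("rows") or []) if _token(dict(row).get("area_id")) == area_id]
    let matched := (((PySem.Dict.mk report).getD "rows" []).filter
        (fun row => pvToken ((PySem.Dict.ofList row).get? "area_id") == area_id)).map PySem.Dict.ofList
    let lines := lines ++ matched.map (fun row =>
        "- `" ++ pvToken (row.get? "command_path") ++ "`: " ++ pvToken (row.get? "description"))
    let lines := if matched.isEmpty then
        lines ++ ["- `dom " ++ area_id ++ "`: namespace reserved; no wrapped commands are currently registered"]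
      else lines
    lines ++ [""]) pvHeader
  PySem.Str.rstrip (PySem.Str.join "\n" lines) ++ "\n"

-- ===== PORT B =====
-- _bullets: one pass over the rows, rendering each row to its bullet line while grouping by area token
def pvBullets (report : List (String × List (List (String × String)))) :
    PySem.Dict String (List String) :=
  ((PySem.Dict.mk report).getD "rows" []).foldl
    (fun d raw =>
      let row := PySem.Dict.ofList raw
      let line := "- `" ++ pvToken (row.get? "command_path") ++ "`: " ++ pvToken (row.get? "description")
      d.modify (pvToken (row.get? "area_id")) [] (· ++ [line]))
    PySem.Dict.empty

-- _section: the five-plus lines of one area's block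
def pvSection (area_id : String) (body : List String) : List String :=
  let body := if body.isEmpty then
      ["- `dom " ++ area_id ++ "`: namespace reserved; no wrapped commands are currently registered"]
    else body
  ["## `" ++ area_id ++ "`", "", pvAreaDescriptions.getD area_id "", ""] ++ body ++ [""]

def render_tool_reference_py_alt (report : List (String × List (List (String × String)))) : String :=
  let bullets := pvBullets report
  let lines := pvHeader ++ pvAreaOrder.flatMap (fun a => pvSection a (bullets.getD a []))
  PySem.Str.rstrip (PySem.Str.join "\n" lines) ++ "\n"

-- ===== PRECONDITION & SPEC =====
def Spec_render_tool_reference_py (report : List (String × List (List (String × String)))) (out : String) : Prop := out = render_tool_reference_py_alt report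
instance (report : List (String × List (List (String × String)))) (out : String) : Decidable (Spec_render_tool_reference_py report out) := by unfold Spec_render_tool_reference_py; infer_instance

-- ===== CLAIM (what is proved, stated in full; the proofs are below) =====
def Claim_equal_render_tool_reference_py : Prop := ∀ (report : List (String × List (List (String × String)))), Dom_render_tool_reference_py report → Spec_render_tool_reference_py report (render_tool_reference_py report)

-- ===== LEMMAS AND PROOFS =====

-- B's grouping pass, looked up at an area, is A's per-area filter with each row already rendered.
theorem pv_bullets_getD (report : List (String × List (List (String × String)))) (area : String) :
    (pvBullets report).getD area []
    = ((((PySem.Dict.mk report).getD "rows" []).filter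
          (fun row => pvToken ((PySem.Dict.ofList row).get? "area_id") == area)).map
        PySem.Dict.ofList).map (fun row =>
          "- `" ++ pvToken (row.get? "command_path") ++ "`: " ++ pvToken (row.get? "description")) := by
  unfold pvBullets
  have h := PySem.Dict.getD_foldl_modify_append
      (l := ((PySem.Dict.mk report).getD "rows" []).map (fun raw =>
          (pvToken ((PySem.Dict.ofList raw).get? "area_id"),
           "- `" ++ pvToken ((PySem.Dict.ofList raw).get? "command_path") ++ "`: "
             ++ pvToken ((PySem.Dict.ofList raw).get? "description"))))
      (d := (PySem.Dict.empty : PySem.Dict String (List String))) (c := area)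
  simp only [List.foldl_map, PySem.Dict.getD_empty, List.nil_append] at h
  rw [h]
  simp only [List.filter_map, List.map_map]
  simp [Function.comp_def]

-- A's per-area appended block is B's section of the looked-up bullets.
theorem pv_block_eq_section (report : List (String × List (List (String × String)))) (a : String) :
    (let matched := (((PySem.Dict.mk report).getD "rows" []).filter
        (fun row => pvToken ((PySem.Dict.ofList row).get? "area_id") == a)).map PySem.Dict.ofList
     ["## `" ++ a ++ "`", "", pvAreaDescriptions.getD a "", ""]
       ++ matched.map (fun row =>
          "- `" ++ pvToken (row.get? "command_path") ++ "`: " ++ pvToken (row.get? "description"))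
       ++ (if matched.isEmpty then
            ["- `dom " ++ a ++ "`: namespace reserved; no wrapped commands are currently registered"]
          else []) ++ [""])
    = pvSection a ((pvBullets report).getD a []) := by
  rw [pv_bullets_getD]
  unfold pvSection
  simp only [List.isEmpty_map]
  cases hE : (((PySem.Dict.mk report).getD "rows" []).filter
      (fun row => pvToken ((PySem.Dict.ofList row).get? "area_id") == a)).isEmpty
  · simp only [Bool.false_eq_true, if_false]
    simp
  · rw [List.isEmpty_iff] at hE
    simp [hE]

theorem render_tool_reference_py_eq (report : List (String × List (List (String × String)))) :
    render_tool_reference_py report = render_tool_reference_py_alt report := by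
  have hf : (fun (lines : List String) (area_id : String) =>
      let lines := lines ++ ["## `" ++ area_id ++ "`", "", pvAreaDescriptions.getD area_id "", ""]
      let matched := (((PySem.Dict.mk report).getD "rows" []).filter
          (fun row => pvToken ((PySem.Dict.ofList row).get? "area_id") == area_id)).map PySem.Dict.ofList
      let lines := lines ++ matched.map (fun row =>
          "- `" ++ pvToken (row.get? "command_path") ++ "`: " ++ pvToken (row.get? "description"))
      let lines := if matched.isEmpty then
          lines ++ ["- `dom " ++ area_id ++ "`: namespace reserved; no wrapped commands are currently registered"]
        else lines
      lines ++ [""])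
      = (fun (acc : List String) (a : String) => acc ++ pvSection a ((pvBullets report).getD a [])) := by
    funext acc a
    rw [← pv_block_eq_section report a]
    simp only [List.append_assoc]
    split_ifs <;> simp
  unfold render_tool_reference_py render_tool_reference_py_alt
  rw [hf, PySem.List.foldl_append_eq_flatMap]

-- ===== VERDICT (by name: the statement is the Claim_ definition above) =====
theorem render_tool_reference_py_spec : Claim_equal_render_tool_reference_py := by
  intro report _
  exact render_tool_reference_py_eq report
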